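-- pv_equiv track=rewrite | github.com/CottageLabs/journalcheckertool | Importer/jctdata/jac.py | _get_publisher
-- ===== SOURCE A (Python) =====
-- def _extract_preferred(title_source_pairs, preference_order):
--     selected = None
--     idx = -1
--     for pref in preference_order:
--         for i, tup in enumerate(title_source_pairs):
--             source, title = tup
--             if pref == source:
--                 selected = title
--                 idx = i
--                 break
--
--     if selected is None:
--         selected = title_source_pairs[0][0]
--         idx = 0
--
--     del title_source_pairs[idx]
--     return selected
--
-- def _get_publisher(issns, publishers, preference_order):
--     pubs = []
--
--     for issn in issns:
--         candidates = publishers.get(issn, [])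
--         for c in candidates:
--             pubs.append((c[0].strip(), c[1].strip()))
--     # for row in pubrows:
--     #     if row[0] in issns:
--     #          pubs.append((row[1].strip(), row[2].strip()))
--
--     if len(pubs) == 0:
--         return None
--
--     pub = _extract_preferred(pubs, preference_order)
--     return pub
-- ===== SOURCE B (Python) =====
-- def _get_publisher(issns, publishers, preference_order):
--     pubs = [(c[0].strip(), c[1].strip())
--             for issn in issns for c in publishers.get(issn, [])]
--     if not pubs:
--         return None
--     rank = {p: i for i, p in enumerate(preference_order)}
--     best, selected = -1, pubs[0][0]
--     for source, title in pubs: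
--         r = rank.get(source, -1)
--         if r > best:
--             best, selected = r, title
--     return selected
-- ===== Notes on version B (the rewrite author's own statement) =====
-- stated objective: faster
-- what changed: Inverts the loop structure: instead of scanning the pub list once per preference (last match wins), B builds a preference->index rank dict once and makes a single argmax pass over the pubs, keeping the first pub with the highest preference rank.
import Mathlib
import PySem

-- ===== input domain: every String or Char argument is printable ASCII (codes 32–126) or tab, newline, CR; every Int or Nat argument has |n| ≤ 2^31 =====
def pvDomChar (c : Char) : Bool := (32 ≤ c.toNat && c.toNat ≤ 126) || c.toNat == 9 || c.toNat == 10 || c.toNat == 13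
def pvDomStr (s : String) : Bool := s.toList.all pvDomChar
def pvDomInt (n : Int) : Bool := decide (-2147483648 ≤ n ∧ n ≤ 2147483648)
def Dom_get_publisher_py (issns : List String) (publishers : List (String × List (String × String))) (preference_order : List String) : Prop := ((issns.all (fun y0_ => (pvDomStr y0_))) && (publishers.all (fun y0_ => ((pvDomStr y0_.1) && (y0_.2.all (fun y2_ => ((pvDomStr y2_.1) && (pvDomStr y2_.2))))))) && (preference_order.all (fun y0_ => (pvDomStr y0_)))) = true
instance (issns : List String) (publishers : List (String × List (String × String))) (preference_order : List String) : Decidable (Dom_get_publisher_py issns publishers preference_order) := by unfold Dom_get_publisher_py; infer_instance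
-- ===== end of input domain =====

-- B inverts A's loop structure (one scan of the pub list per preference, last match wins)
-- into a rank dict over preference_order plus a single argmax pass over the pubs; return
-- value only (A mutates only a local list, not its arguments).

-- ===== PORT A =====
-- inner 'for i, tup in enumerate(title_source_pairs): … break' of _extract_preferred
def pvFindA (pairs : List (String × String)) (pref : String) (i : Nat) : Option (Nat × String) :=
  match pairs with
  | [] => none
  | (source, title) :: rest => if pref == source then some (i, title) else pvFindA rest pref (i + 1)

-- the (selected, idx) loop of _extract_preferred over preference_order
def pvExtractState (pairs : List (String × String)) (preference_order : List String) : Option String × Int :=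
  preference_order.foldl (fun st pref =>
    match pvFindA pairs pref 0 with
    | some it => (some it.2, (it.1 : Int))
    | none => st) (none, -1)

def get_publisher_py (issns : List String) (publishers : List (String × List (String × String))) (preference_order : List String) : Option String :=
  let pubs : List (String × String) :=
    issns.foldl (fun pubs issn =>
      ((PySem.Dict.mk publishers).getD issn []).foldl
        (fun pubs c => pubs ++ [(PySem.Str.strip c.1, PySem.Str.strip c.2)]) pubs) []
  if pubs.length = 0 then none
  else
    -- _extract_preferred: the del of pubs[idx] is local mutation, invisible in the return value
    let st := pvExtractState pubs preference_order
    match st.1 with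
    | some t => some t
    | none => some ((pubs.headD ("", "")).1)   -- pubs[0][0]; pubs nonempty here

-- ===== PORT B =====
-- rank = {p: i for i, p in enumerate(preference_order)}
def pvRankDict (prefs : List String) : PySem.Dict String Int :=
  (PySem.List.enumerate prefs).foldl (fun d ip => d.insert ip.2 ip.1) PySem.Dict.empty

def get_publisher_py_alt (issns : List String) (publishers : List (String × List (String × String))) (preference_order : List String) : Option String :=
  let pubs : List (String × String) :=
    issns.flatMap (fun issn =>
      ((PySem.Dict.mk publishers).getD issn []).map (fun c => (PySem.Str.strip c.1, PySem.Str.strip c.2)))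
  match pubs with
  | [] => none
  | p0 :: _ =>
    let rank := pvRankDict preference_order
    some ((pubs.foldl (fun st pub =>
      let r := rank.getD pub.1 (-1)
      if r > st.1 then (r, pub.2) else st) ((-1 : Int), p0.1)).2)

-- ===== PRECONDITION & SPEC =====
def Spec_get_publisher_py (issns : List String) (publishers : List (String × List (String × String))) (preference_order : List String) (out : Option String) : Prop := out = get_publisher_py_alt issns publishers preference_order
instance (issns : List String) (publishers : List (String × List (String × String))) (preference_order : List String) (out : Option String) : Decidable (Spec_get_publisher_py issns publishers preference_order out) := by unfold Spec_get_publisher_py; infer_instance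

-- ===== CLAIM (what is proved, stated in full; the proofs are below) =====
def Claim_equal_get_publisher_py : Prop := ∀ (issns : List String) (publishers : List (String × List (String × String))) (preference_order : List String), Dom_get_publisher_py issns publishers preference_order → Spec_get_publisher_py issns publishers preference_order (get_publisher_py issns publishers preference_order)

-- ===== LEMMAS AND PROOFS =====

-- the two pub-list builders agree
theorem pv_pubs_eq (issns : List String) (publishers : List (String × List (String × String))) :
    issns.foldl (fun pubs issn =>
      ((PySem.Dict.mk publishers).getD issn []).foldl
        (fun pubs c => pubs ++ [(PySem.Str.strip c.1, PySem.Str.strip c.2)]) pubs) []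
    = issns.flatMap (fun issn =>
      ((PySem.Dict.mk publishers).getD issn []).map (fun c => (PySem.Str.strip c.1, PySem.Str.strip c.2))) := by
  have inner : ∀ (l : List (String × String)) (acc : List (String × String)),
      l.foldl (fun pubs c => pubs ++ [(PySem.Str.strip c.1, PySem.Str.strip c.2)]) acc
      = acc ++ l.map (fun c => (PySem.Str.strip c.1, PySem.Str.strip c.2)) := by
    intro l
    induction l with
    | nil => simp
    | cons c rest ih => intro acc; simp [List.foldl, ih]
  have outer : ∀ (is : List String) (acc : List (String × String)),
      is.foldl (fun pubs issn =>
        ((PySem.Dict.mk publishers).getD issn []).foldl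
          (fun pubs c => pubs ++ [(PySem.Str.strip c.1, PySem.Str.strip c.2)]) pubs) acc
      = acc ++ is.flatMap (fun issn =>
        ((PySem.Dict.mk publishers).getD issn []).map (fun c => (PySem.Str.strip c.1, PySem.Str.strip c.2))) := by
    intro is
    induction is with
    | nil => simp
    | cons i rest ih => intro acc; simp [List.foldl, inner, List.flatMap_def]
  simpa using outer issns []

-- B's selection step, abbreviated for the lemmas
def pvStep (d : PySem.Dict String Int) (st : Int × String) (pub : String × String) : Int × String :=
  if d.getD pub.1 (-1) > st.1 then (d.getD pub.1 (-1), pub.2) else st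

theorem pvStep_eq (d : PySem.Dict String Int) :
    (fun (st : Int × String) (pub : String × String) =>
      let r := d.getD pub.1 (-1)
      if r > st.1 then (r, pub.2) else st) = pvStep d := rfl

-- the rank dict of prefs ++ [p] is an insert on the rank dict of prefs
theorem pvRank_snoc (prefs : List String) (p : String) :
    pvRankDict (prefs ++ [p]) = (pvRankDict prefs).insert p (prefs.length : Int) := by
  unfold pvRankDict
  rw [PySem.List.enumerate_append, List.foldl_append]
  simp [PySem.List.enumerate]

-- all values in the rank dict are < the number of preferences
theorem pvRank_vals (prefs : List String) :
    ∀ s v, (pvRankDict prefs).get? s = some v → v < (prefs.length : Int) := by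
  induction prefs using List.reverseRecOn with
  | nil => intro s v h; simp [pvRankDict, PySem.List.enumerate] at h
  | append_singleton prefs p ih =>
    intro s v h
    rw [pvRank_snoc, PySem.Dict.get?_insert] at h
    by_cases hs : s = p
    · rw [if_pos hs] at h
      have hv : v = ((prefs ++ [p]).length - 1 : Nat) := by
        injection h with h'
        simp [h'.symm]
      subst hv
      simp only [List.length_append, List.length_cons, List.length_nil]
      push_cast
      omega
    · rw [if_neg hs] at h
      have := ih s v h
      simp only [List.length_append, List.length_cons, List.length_nil]
      push_cast
      omega

-- pvFindA finds nothing iff no pair has that source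
theorem pvFindA_none_iff (pairs : List (String × String)) (p : String) :
    ∀ i, pvFindA pairs p i = none ↔ ∀ q ∈ pairs, q.1 ≠ p := by
  induction pairs with
  | nil => intro i; simp [pvFindA]
  | cons q rest ih =>
    intro i
    obtain ⟨s, t⟩ := q
    by_cases h : (p == s) = true
    · have hps : p = s := by simpa using h
      simp [pvFindA, hps]
    · have hps : ¬ s = p := by
        intro hc; exact h (by simp [hc])
      simp [pvFindA, h, ih (i + 1), hps]

-- once the running best is an upper bound of every rank, the fold is inert
theorem pv_fold_inert (d : PySem.Dict String Int) (pairs : List (String × String)) :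
    ∀ st : Int × String, (-1 : Int) ≤ st.1 →
      (∀ s v, d.get? s = some v → v ≤ st.1) →
      pairs.foldl (pvStep d) st = st := by
  induction pairs with
  | nil => intro st _ _; rfl
  | cons q rest ih =>
    intro st hneg hub
    have hle : d.getD q.1 (-1) ≤ st.1 := by
      rw [PySem.Dict.getD_eq_get?_getD]
      cases h : d.get? q.1 with
      | none => simpa using hneg
      | some v => simpa using hub q.1 v h
    have : pvStep d st q = st := by
      unfold pvStep
      rw [if_neg (by omega)]
    rw [List.foldl_cons, this]
    exact ih st hneg hub

-- a key with rank N dominating every stored rank: the argmax lands on its first occurrence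
theorem pv_fold_insert_found (d : PySem.Dict String Int) (p : String) (N : Int)
    (hN0 : (0 : Int) ≤ N)
    (hvals : ∀ s v, d.get? s = some v → v < N) (pairs : List (String × String)) :
    ∀ (i : Nat) (j : Nat) (t : String) (st : Int × String), st.1 < N →
      pvFindA pairs p i = some (j, t) →
      pairs.foldl (pvStep (d.insert p N)) st = (N, t) := by
  induction pairs with
  | nil => intro i j t st _ h; simp [pvFindA] at h
  | cons q rest ih =>
    intro i j t st hst hfind
    obtain ⟨s, u⟩ := q
    rw [List.foldl_cons]
    by_cases h : (p == s) = true
    · have hps : p = s := by simpa using h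
      have hfind' : some ((i : Nat), u) = some (j, t) := by
        simpa [pvFindA, h] using hfind
      have ht : u = t := by
        simp at hfind'
        exact hfind'.2
      subst ht
      have hget : (d.insert p N).getD s (-1) = N := by
        simp [hps.symm]
      have hstep : pvStep (d.insert p N) st (s, u) = (N, u) := by
        unfold pvStep
        rw [hget, if_pos (by omega)]
      rw [hstep]
      apply pv_fold_inert
      · simp only
        omega
      · intro s' v hv
        rw [PySem.Dict.get?_insert] at hv
        by_cases hsp : s' = p
        · rw [if_pos hsp] at hv
          injection hv with hv'
          simp only
          omega
        · rw [if_neg hsp] at hv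
          have := hvals s' v hv
          simp only
          omega
    · have hsp : ¬ s = p := fun hc => h (by simp [hc])
      have hfind' : pvFindA rest p (i + 1) = some (j, t) := by
        simpa [pvFindA, h] using hfind
      have hget : (d.insert p N).getD s (-1) = d.getD s (-1) := by
        simp [PySem.Dict.getD_insert, hsp]
      have hlt : d.getD s (-1) < N := by
        rw [PySem.Dict.getD_eq_get?_getD]
        cases hv : d.get? s with
        | none =>
          simp only [Option.getD_none]
          omega
        | some v => simpa using hvals s v hv
      by_cases hcmp : d.getD s (-1) > st.1
      · have : pvStep (d.insert p N) st (s, u) = (d.getD s (-1), u) := by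
          unfold pvStep; rw [hget, if_pos hcmp]
        rw [this]
        exact ih (i + 1) j t _ (by simpa using hlt) hfind'
      · have : pvStep (d.insert p N) st (s, u) = st := by
          unfold pvStep; rw [hget, if_neg hcmp]
        rw [this]
        exact ih (i + 1) j t st hst hfind'

-- inserting a key no pair carries does not change the fold
theorem pv_fold_insert_absent (d : PySem.Dict String Int) (p : String) (N : Int)
    (pairs : List (String × String)) (habs : ∀ q ∈ pairs, q.1 ≠ p) :
    ∀ st : Int × String,
      pairs.foldl (pvStep (d.insert p N)) st = pairs.foldl (pvStep d) st := by
  induction pairs with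
  | nil => intro st; rfl
  | cons q rest ih =>
    intro st
    have hq : q.1 ≠ p := habs q (by simp)
    have hget : (d.insert p N).getD q.1 (-1) = d.getD q.1 (-1) := by
      simp [PySem.Dict.getD_insert, hq]
    have hstep : pvStep (d.insert p N) st q = pvStep d st q := by
      unfold pvStep; rw [hget]
    rw [List.foldl_cons, List.foldl_cons, hstep]
    exact ih (fun q hq' => habs q (by simp [hq'])) _

-- MAIN: B's argmax pass computes A's preference loop (with fallback b0)
theorem pv_main (prefs : List String) (pairs : List (String × String)) (b0 : String) :
    (pairs.foldl (pvStep (pvRankDict prefs)) ((-1 : Int), b0)).2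
    = ((prefs.foldl (fun st pref =>
        match pvFindA pairs pref 0 with
        | some it => (some it.2, (it.1 : Int))
        | none => st) ((none : Option String), (-1 : Int))).1).getD b0 := by
  induction prefs using List.reverseRecOn with
  | nil =>
    have h0 : pairs.foldl (pvStep (pvRankDict [])) ((-1 : Int), b0) = ((-1 : Int), b0) := by
      apply pv_fold_inert
      · simp
      · intro s v hv
        simp [pvRankDict, PySem.List.enumerate] at hv
    simp [h0]
  | append_singleton prefs p ih =>
    rw [pvRank_snoc, List.foldl_append]
    simp only [List.foldl_cons, List.foldl_nil]
    cases hfind : pvFindA pairs p 0 with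
    | none =>
      have habs : ∀ q ∈ pairs, q.1 ≠ p := (pvFindA_none_iff pairs p 0).mp hfind
      rw [pv_fold_insert_absent _ _ _ _ habs]
      simpa using ih
    | some it =>
      have hN : ((-1 : Int), b0).1 < (prefs.length : Int) := by
        simp only
        have : (0 : Int) ≤ (prefs.length : Int) := by positivity
        omega
      rw [pv_fold_insert_found (pvRankDict prefs) p (prefs.length : Int) (by positivity)
            (pvRank_vals prefs) pairs 0 it.1 it.2 _ hN (by simpa using hfind)]
      simp

-- ===== VERDICT (by name: the statement is the Claim_ definition above) =====
theorem get_publisher_py_spec : Claim_equal_get_publisher_py := by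
  intro issns publishers preference_order _
  unfold Spec_get_publisher_py get_publisher_py get_publisher_py_alt pvExtractState
  rw [pv_pubs_eq]
  cases hp : issns.flatMap (fun issn =>
      ((PySem.Dict.mk publishers).getD issn []).map (fun c => (PySem.Str.strip c.1, PySem.Str.strip c.2))) with
  | nil => simp
  | cons p0 rest =>
    simp only [List.length_cons, Nat.succ_ne_zero, List.headD_cons]
    rw [pvStep_eq]
    have hmain := pv_main preference_order (p0 :: rest) p0.1
    cases hfold : (preference_order.foldl (fun st pref =>
        match pvFindA (p0 :: rest) pref 0 with
        | some it => (some it.2, (it.1 : Int))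
        | none => st) ((none : Option String), (-1 : Int))).1 with
    | none =>
      rw [hfold] at hmain
      simp only [Option.getD_none] at hmain
      simpa using hmain.symm
    | some t =>
      rw [hfold] at hmain
      simp only [Option.getD_some] at hmain
      simpa using hmain.symm
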